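-- pv_equiv track=rewrite | github.com/girtsf/adv2024 | src/day24.py | calc_z
-- ===== SOURCE A (Python) =====
-- def calc_z(wires: dict[str, bool]) -> int:
--     out = 0
--     for k, v in wires.items():
--         if not k.startswith("z"):
--             continue
--         if not v:
--             continue
--         out |= 1 << int(k[1:])
--     return out
-- ===== SOURCE B (Python) =====
-- def calc_z(wires: dict[str, bool]) -> int:
--     # Collect the set of bit positions whose z-wire is true, then rebuild the
--     # integer positionally from the highest position down to 0.
--     zs = {int(k[1:]) for k, v in wires.items() if k.startswith("z") and v}
--     if not zs:
--         return 0
--     out = 0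
--     for i in range(max(zs), -1, -1):
--         out = out * 2 + (1 if i in zs else 0)
--     return out
-- ===== Notes on version B (the rewrite author's own statement) =====
-- stated objective: alternative
-- what changed: B first collects the true z-wire bit positions into a set, then reconstructs the integer positionally by iterating bit positions from max(zs) down to 0 and shifting in one bit per position, instead of OR-ing sparse one-bit masks in wire iteration order.
import Mathlib
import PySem

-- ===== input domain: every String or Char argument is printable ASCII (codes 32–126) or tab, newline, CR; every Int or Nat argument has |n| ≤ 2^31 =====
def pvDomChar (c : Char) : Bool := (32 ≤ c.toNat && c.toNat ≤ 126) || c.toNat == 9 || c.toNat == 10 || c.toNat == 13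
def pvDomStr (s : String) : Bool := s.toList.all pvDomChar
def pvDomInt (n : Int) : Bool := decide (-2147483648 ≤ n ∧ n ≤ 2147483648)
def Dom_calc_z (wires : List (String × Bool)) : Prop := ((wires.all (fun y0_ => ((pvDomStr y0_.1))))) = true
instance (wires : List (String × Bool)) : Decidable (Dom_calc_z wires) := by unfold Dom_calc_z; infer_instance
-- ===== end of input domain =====

-- B collects the true z-wire bit positions into a set and rebuilds the integer
-- positionally from the highest position down to 0, instead of OR-ing sparse
-- one-bit masks in wire order (objective: alternative decomposition, same cost).

-- ===== PORT A =====
def calc_z (wires : List (String × Bool)) : Int :=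
  wires.foldl (fun out kv =>
    if !(PySem.Str.startswith kv.1 "z") then out
    else if !kv.2 then out
    else
      match PySem.Int.ofStr? (PySem.Str.slice kv.1 (some 1) none) with
      | none => out        -- int(k[1:]) raises ValueError here: excluded by Pre_
      | some n =>
        if n < 0 then out  -- 1 << negative raises ValueError here: excluded by Pre_
        else PySem.Int.bor out ((1 : Int) <<< n.toNat)) 0

-- ===== PORT B =====
def calc_z_alt (wires : List (String × Bool)) : Int :=
  let zs : PySem.Set Int := PySem.Set.ofList (wires.filterMap (fun kv =>
    if PySem.Str.startswith kv.1 "z" && kv.2 then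
      PySem.Int.ofStr? (PySem.Str.slice kv.1 (some 1) none)  -- none = int() raises: excluded by Pre_
    else none))
  match PySem.List.max? zs (fun x => x) with
  | none => 0
  | some hi =>
    (PySem.List.pyRange hi (-1) (-1)).foldl
      (fun out i => out * 2 + (if PySem.Set.contains zs i then 1 else 0)) 0

-- ===== PRECONDITION & SPEC =====
-- Pre_ excludes exactly the inputs on which A raises ValueError: a wire that is
-- true and z-prefixed whose suffix does not parse as a Python int literal
-- (int(k[1:]) raises), or parses to a negative int (1 << negative raises).
def Pre_calc_z (wires : List (String × Bool)) : Prop :=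
  (wires.all (fun kv =>
    !(PySem.Str.startswith kv.1 "z" && kv.2) ||
    ((PySem.Int.ofStr? (PySem.Str.slice kv.1 (some 1) none)).isSome &&
     decide (0 ≤ (PySem.Int.ofStr? (PySem.Str.slice kv.1 (some 1) none)).getD 0)))) = true
instance (wires : List (String × Bool)) : Decidable (Pre_calc_z wires) := by
  unfold Pre_calc_z; infer_instance
def pvWitness_calc_z : (List (String × Bool)) :=
  [("z2", true), ("z0", true), ("x1", true), ("z1", false)]

def Spec_calc_z (wires : List (String × Bool)) (out : Int) : Prop := out = calc_z_alt wires
instance (wires : List (String × Bool)) (out : Int) : Decidable (Spec_calc_z wires out) := by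
  unfold Spec_calc_z; infer_instance

-- ===== CLAIM (what is proved, stated in full; the proofs are below) =====
def Claim_equal_calc_z : Prop := ∀ (wires : List (String × Bool)), Dom_calc_z wires → Pre_calc_z wires → Spec_calc_z wires (calc_z wires)
-- ===== LEMMAS AND PROOFS =====

-- A's loop step, named for the proofs (definitionally the lambda inside calc_z)
def pvStepA (out : Int) (kv : String × Bool) : Int :=
  if !(PySem.Str.startswith kv.1 "z") then out
  else if !kv.2 then out
  else
    match PySem.Int.ofStr? (PySem.Str.slice kv.1 (some 1) none) with
    | none => out
    | some n =>
      if n < 0 then out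
      else PySem.Int.bor out ((1 : Int) <<< n.toNat)

-- the per-wire parse of both ports and of Pre_
def pvParse (kv : String × Bool) : Option Int :=
  if PySem.Str.startswith kv.1 "z" && kv.2 then
    PySem.Int.ofStr? (PySem.Str.slice kv.1 (some 1) none)
  else none

-- the positions of the true z-wires, in wire order
def pvPos (wires : List (String × Bool)) : List Int := wires.filterMap pvParse

-- A's accumulator on the Nat side: OR of one-bit masks
def pvOr (q : List Nat) (a : Nat) : Nat := q.foldl (fun acc n => acc ||| 2 ^ n) a

-- B's result on the Nat side: sum of the present powers of two below n
def pvSum (zs : PySem.Set Int) (n : Nat) : Nat :=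
  ((List.range n).map (fun (j : Nat) =>
    if PySem.Set.contains zs ((j : Nat) : Int) then 2 ^ j else 0)).sum

theorem pvStepA_eq (out : Int) (kv : String × Bool) :
    pvStepA out kv
      = (match pvParse kv with
         | none => out
         | some n => if n < 0 then out else PySem.Int.bor out ((1 : Int) <<< n.toNat)) := by
  rw [pvStepA, pvParse]
  cases hz : PySem.Chars.startswith kv.1.toList ['z'] <;> cases hv : kv.2 <;> simp [hz]

theorem pvPre_elem {kv : String × Bool}
    (h : (!(PySem.Str.startswith kv.1 "z" && kv.2) ||
      ((PySem.Int.ofStr? (PySem.Str.slice kv.1 (some 1) none)).isSome &&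
       decide (0 ≤ (PySem.Int.ofStr? (PySem.Str.slice kv.1 (some 1) none)).getD 0))) = true)
    {n : Int} (hp : pvParse kv = some n) : 0 ≤ n := by
  rw [pvParse] at hp
  by_cases hc : (PySem.Str.startswith kv.1 "z" && kv.2) = true
  · rw [if_pos hc] at hp
    rw [hc, Bool.not_true, Bool.false_or, hp] at h
    simp at h
    exact h
  · rw [if_neg hc] at hp; cases hp

theorem pvOr_testBit (q : List Nat) (a j : Nat) :
    (pvOr q a).testBit j = (a.testBit j || decide (j ∈ q)) := by
  induction q generalizing a with
  | nil => simp [pvOr]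
  | cons x t ih =>
    simp only [pvOr, List.foldl_cons] at *
    rw [ih, Nat.testBit_or, Nat.testBit_two_pow]
    by_cases hx : x = j
    · subst hx; by_cases hm : x ∈ t <;> simp [hm, List.mem_cons]
    · by_cases hm : j ∈ t <;> simp [hx, Ne.symm hx, hm, List.mem_cons]

theorem pvSum_step (zs : PySem.Set Int) (n : Nat) :
    pvSum zs (n + 1)
      = pvSum zs n + (if PySem.Set.contains zs ((n : Nat) : Int) then 2 ^ n else 0) := by
  simp only [pvSum, List.range_succ, List.map_append, List.map_cons, List.map_nil,
    List.sum_append, List.sum_cons, List.sum_nil, add_zero]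

theorem pvSum_lt (zs : PySem.Set Int) (n : Nat) : pvSum zs n < 2 ^ n := by
  induction n with
  | zero => simp [pvSum]
  | succ n ih =>
    rw [pvSum_step, pow_succ]
    by_cases h : PySem.Set.contains zs ((n : Nat) : Int) = true
    · rw [if_pos h]; linarith
    · rw [if_neg h, Nat.add_zero]
      have h2 : (0:Nat) < 2 ^ n := Nat.two_pow_pos n
      linarith

theorem pvSum_testBit (zs : PySem.Set Int) (n j : Nat) :
    (pvSum zs n).testBit j = (decide (j < n) && PySem.Set.contains zs ((j : Nat) : Int)) := by
  induction n with
  | zero => simp [pvSum]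
  | succ n ih =>
    rcases lt_trichotomy j n with hj | hj | hj
    · -- j < n : the new top bit does not affect bit j
      have h1 : decide (j < n) = true := by simp [hj]
      have h2 : decide (j < n + 1) = true := by simp; omega
      rw [pvSum_step]
      by_cases h : PySem.Set.contains zs ((n : Nat) : Int) = true
      · rw [if_pos h, add_comm, Nat.testBit_two_pow_add_gt hj, ih, h1, h2]
      · rw [if_neg h, Nat.add_zero, ih, h1, h2]
    · subst hj
      rw [pvSum_step]
      by_cases h : PySem.Set.contains zs ((j : Nat) : Int) = true
      · rw [if_pos h, add_comm, Nat.testBit_two_pow_add_eq,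
            Nat.testBit_lt_two_pow (pvSum_lt zs j), h]
        simp
      · rw [Bool.not_eq_true] at h
        rw [h, if_neg (by simp), Nat.add_zero,
            Nat.testBit_lt_two_pow (pvSum_lt zs j), Bool.and_false]
    · -- n < j : bit j is above the whole sum
      have hlt : pvSum zs (n + 1) < 2 ^ j :=
        lt_of_lt_of_le (pvSum_lt zs (n + 1)) (Nat.pow_le_pow_right (by norm_num) (by omega))
      rw [Nat.testBit_lt_two_pow hlt,
          decide_eq_false (by omega : ¬ j < n + 1), Bool.false_and]

-- A's loop computes the Nat-side OR fold over the parsed positions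
theorem pvA_fold (l : List (String × Bool))
    (h : ∀ kv ∈ l, (!(PySem.Str.startswith kv.1 "z" && kv.2) ||
      ((PySem.Int.ofStr? (PySem.Str.slice kv.1 (some 1) none)).isSome &&
       decide (0 ≤ (PySem.Int.ofStr? (PySem.Str.slice kv.1 (some 1) none)).getD 0))) = true) (a : Nat) :
    l.foldl pvStepA ((a : Nat) : Int) = ((pvOr ((pvPos l).map Int.toNat) a : Nat) : Int) := by
  induction l generalizing a with
  | nil => simp [pvPos, pvOr]
  | cons kv t ih =>
    have ht : ∀ kv ∈ t, _ := fun kv hm => h kv (List.mem_cons_of_mem _ hm)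
    rw [List.foldl_cons, pvStepA_eq]
    rcases hp : pvParse kv with _ | n
    · have hP : pvPos (kv :: t) = pvPos t := by
        simp [pvPos, hp]
      rw [hP]
      exact ih ht a
    · have hn : 0 ≤ n := pvPre_elem (h kv (List.mem_cons_self ..)) hp
      show List.foldl pvStepA
          (if n < 0 then ((a : Nat) : Int)
           else PySem.Int.bor ((a : Nat) : Int) ((1 : Int) <<< n.toNat)) t = _
      rw [if_neg (not_lt.mpr hn)]
      have hcast : PySem.Int.bor ((a : Nat) : Int) ((1 : Int) <<< n.toNat)
          = (((a ||| 2 ^ n.toNat : Nat) : Nat) : Int) := by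
        have h1 : (1 : Int) <<< n.toNat = ((2 ^ n.toNat : Nat) : Int) := by
          rw [Int.shiftLeft_eq]; push_cast; ring
        rw [h1, PySem.Int.bor_natCast]
      rw [hcast, ih ht]
      have hP : pvPos (kv :: t) = n :: pvPos t := by
        simp [pvPos, hp]
      rw [hP]
      simp [pvOr]

-- B's countdown loop computes the positional sum
theorem pvB_fold (zs : PySem.Set Int) (n : Nat) : ∀ c : Int,
    ((PySem.List.pyRange 0 ((n : Nat) : Int) 1).reverse).foldl
      (fun out i => out * 2 + (if PySem.Set.contains zs i then 1 else 0)) c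
      = c * 2 ^ n + ((pvSum zs n : Nat) : Int) := by
  induction n with
  | zero =>
    intro c
    rw [Nat.cast_zero, PySem.List.pyRange_one_eq_nil le_rfl]
    simp [pvSum]
  | succ n ih =>
    intro c
    have hcast : ((n + 1 : Nat) : Int) = ((n : Nat) : Int) + 1 := by push_cast; ring
    have hr : PySem.List.pyRange 0 (((n : Nat) : Int) + 1) 1
        = PySem.List.pyRange 0 ((n : Nat) : Int) 1 ++ [((n : Nat) : Int)] :=
      PySem.List.pyRange_one_succ_right (by positivity)
    rw [hcast, hr, List.reverse_append, List.reverse_singleton, List.singleton_append,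
        List.foldl_cons, ih, pvSum_step]
    push_cast
    split_ifs <;> ring

-- positions are nonnegative under Pre_
theorem pvPos_nonneg (wires : List (String × Bool)) (hpre : Pre_calc_z wires) :
    ∀ x ∈ pvPos wires, 0 ≤ x := by
  intro x hx
  rw [pvPos, List.mem_filterMap] at hx
  obtain ⟨kv, hkv, hp⟩ := hx
  rw [Pre_calc_z, List.all_eq_true] at hpre
  exact pvPre_elem (hpre kv hkv) hp

-- ===== VERDICT (by name: the statement is the Claim_ definition above) =====
theorem calc_z_spec : Claim_equal_calc_z := by
  intro wires _ hpre
  unfold Spec_calc_z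
  have hA : calc_z wires = ((pvOr ((pvPos wires).map Int.toNat) 0 : Nat) : Int) := by
    have h0 : calc_z wires = wires.foldl pvStepA (((0 : Nat) : Nat) : Int) := rfl
    rw [h0, pvA_fold wires (by rw [Pre_calc_z, List.all_eq_true] at hpre; exact hpre) 0]
  have hzs : calc_z_alt wires
      = (match PySem.List.max? (PySem.Set.ofList (pvPos wires)) (fun x => x) with
         | none => 0
         | some hi =>
           (PySem.List.pyRange hi (-1) (-1)).foldl
             (fun out i => out * 2 +
               (if PySem.Set.contains (PySem.Set.ofList (pvPos wires)) i then 1 else 0)) 0) := rfl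
  rcases hmax : PySem.List.max? (PySem.Set.ofList (pvPos wires)) (fun x => x) with _ | hi
  · -- no z-wire is true: both sides are 0
    have hBnone : calc_z_alt wires = 0 := by rw [hzs, hmax]
    have hzempty : PySem.Set.ofList (pvPos wires) = [] :=
      (PySem.List.max?_eq_none_iff _ _).mp hmax
    have hP : pvPos wires = [] := by
      rcases hp : pvPos wires with _ | ⟨x, t⟩
      · rfl
      · have hx : x ∈ PySem.Set.ofList (pvPos wires) := by
          rw [PySem.Set.mem_ofList, hp]; exact List.mem_cons_self ..
        rw [hzempty] at hx; simp at hx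
    rw [hA, hBnone, hP]
    simp [pvOr]
  · -- hi = highest true position
    have hBsome : calc_z_alt wires
        = (PySem.List.pyRange hi (-1) (-1)).foldl
            (fun out i => out * 2 +
              (if PySem.Set.contains (PySem.Set.ofList (pvPos wires)) i then 1 else 0)) 0 := by
      rw [hzs, hmax]
    have hhiP : hi ∈ pvPos wires := by
      have := PySem.List.max?_mem hmax
      rwa [PySem.Set.mem_ofList] at this
    have hhi0 : 0 ≤ hi := pvPos_nonneg wires hpre hi hhiP
    have hle : ∀ y ∈ pvPos wires, y ≤ hi := by
      intro y hy
      exact PySem.List.max?_isMax hmax y ((PySem.Set.mem_ofList _ _).mpr hy)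
    rw [hA, hBsome, PySem.List.pyRange_neg_one_eq_reverse]
    have h01 : (-1 : Int) + 1 = 0 := by ring
    have hhi1 : hi + 1 = ((hi.toNat + 1 : Nat) : Int) := by push_cast; omega
    rw [h01, hhi1, pvB_fold, zero_mul, zero_add]
    congr 1
    apply Nat.eq_of_testBit_eq
    intro j
    rw [pvOr_testBit, pvSum_testBit, Nat.zero_testBit, Bool.false_or]
    have hmem : j ∈ (pvPos wires).map Int.toNat ↔ ((j : Nat) : Int) ∈ pvPos wires := by
      constructor
      · intro hm
        rw [List.mem_map] at hm
        obtain ⟨x, hx, hxe⟩ := hm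
        have hx0 := pvPos_nonneg wires hpre x hx
        have hxx : ((j : Nat) : Int) = x := by omega
        rwa [hxx]
      · intro hm
        rw [List.mem_map]
        exact ⟨((j : Nat) : Int), hm, by omega⟩
    have hcont : PySem.Set.contains (PySem.Set.ofList (pvPos wires)) ((j : Nat) : Int) = true
        ↔ ((j : Nat) : Int) ∈ pvPos wires := by
      rw [PySem.Set.contains_iff, PySem.Set.mem_ofList]
    by_cases hj : ((j : Nat) : Int) ∈ pvPos wires
    · have hjle : ((j : Nat) : Int) ≤ hi := hle _ hj
      have hjm : j < hi.toNat + 1 := by omega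
      rw [decide_eq_true (hmem.mpr hj), decide_eq_true hjm, hcont.mpr hj, Bool.true_and]
    · have hc1 : PySem.Set.contains (PySem.Set.ofList (pvPos wires)) ((j : Nat) : Int) = false :=
        Bool.eq_false_iff.mpr (fun h => hj (hcont.mp h))
      rw [decide_eq_false (fun h => hj (hmem.mp h)), hc1, Bool.and_false]
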